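-- pv_equiv track=rewrite | github.com/mischaikow/advent_of_code | 2015/03_code.py | part1
-- ===== SOURCE A (Python) =====
-- from collections import defaultdict
--
-- def part1(input_instructions: str):
--   loc = (0, 0)
--   visited = defaultdict(int)
--   visited[loc] += 1
--   for val in input_instructions:
--     if val == '^':
--       loc = (loc[0], loc[1]+1)
--     elif val == 'v':
--       loc = (loc[0], loc[1]-1)
--     elif val == '<':
--       loc = (loc[0]-1, loc[1])
--     elif val == '>':
--       loc = (loc[0]+1, loc[1])
--     visited[loc] += 1
--
--   return len(visited)
-- ===== SOURCE B (Python) =====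
-- from itertools import accumulate
--
-- DX = {'<': -1, '>': 1}
-- DY = {'v': -1, '^': 1}
--
-- def part1(input_instructions: str):
--   xs = list(accumulate((DX.get(c, 0) for c in input_instructions), initial=0))
--   ys = list(accumulate((DY.get(c, 0) for c in input_instructions), initial=0))
--   pts = sorted(zip(xs, ys))
--   return 1 + sum(p != q for p, q in zip(pts, pts[1:]))
-- ===== Notes on version B (the rewrite author's own statement) =====
-- stated objective: alternative
-- what changed: Replaces A's hash-dict marking inside one interleaved walk with a sort-based distinct count: two independent per-coordinate prefix-sum scans build the positions, which are then sorted and the distinct count is 1 + number of adjacent unequal pairs (sort-then-scan dedupe instead of a hash structure).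
import Mathlib
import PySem

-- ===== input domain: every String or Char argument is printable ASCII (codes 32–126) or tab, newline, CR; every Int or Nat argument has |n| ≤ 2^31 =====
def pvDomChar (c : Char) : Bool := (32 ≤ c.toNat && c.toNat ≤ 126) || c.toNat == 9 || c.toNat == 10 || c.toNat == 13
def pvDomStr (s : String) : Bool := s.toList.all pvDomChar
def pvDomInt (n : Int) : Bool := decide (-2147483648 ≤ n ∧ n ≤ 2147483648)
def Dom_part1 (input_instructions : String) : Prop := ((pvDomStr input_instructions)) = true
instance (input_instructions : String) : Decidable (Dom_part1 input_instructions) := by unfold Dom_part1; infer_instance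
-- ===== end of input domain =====

-- B replaces A's hash-dict marking in one interleaved walk with two per-coordinate
-- prefix-sum scans followed by sort-then-scan distinct counting; alternative, not faster.


-- ===== PORT A =====
-- the if/elif chain updating loc (falls through leaving loc unchanged)
def pvStepA (loc : Int × Int) (val : Char) : Int × Int :=
  if val = '^' then (loc.1, loc.2 + 1)
  else if val = 'v' then (loc.1, loc.2 - 1)
  else if val = '<' then (loc.1 - 1, loc.2)
  else if val = '>' then (loc.1 + 1, loc.2)
  else loc

def part1 (input_instructions : String) : Int :=
  let loc : Int × Int := (0, 0)
  let visited : PySem.Dict (Int × Int) Int := (PySem.Dict.empty).modify loc 0 (· + 1)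
  let st := input_instructions.toList.foldl
    (fun (st : (Int × Int) × PySem.Dict (Int × Int) Int) val =>
      let loc := pvStepA st.1 val
      (loc, st.2.modify loc 0 (· + 1)))
    (loc, visited)
  (st.2.size : Int)

-- ===== PORT B =====
-- the DX/DY tables with .get(c, 0) default
def pvDX (c : Char) : Int := if c = '<' then -1 else if c = '>' then 1 else 0
def pvDY (c : Char) : Int := if c = 'v' then -1 else if c = '^' then 1 else 0

-- accumulate(deltas, initial=0) is scanl (+) 0; sorted(tuples) is sorted2 fst snd;
-- sum(p != q for p, q in zip(pts, pts[1:])) is countP (!=) on zip pts pts.tail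
def part1_alt (input_instructions : String) : Int :=
  let xs := (input_instructions.toList.map pvDX).scanl (· + ·) (0 : Int)
  let ys := (input_instructions.toList.map pvDY).scanl (· + ·) (0 : Int)
  let pts := PySem.List.sorted2 (xs.zip ys) Prod.fst Prod.snd
  1 + (((pts.zip pts.tail).countP (fun pq => pq.1 != pq.2) : Nat) : Int)

-- ===== PRECONDITION & SPEC =====
def Spec_part1 (input_instructions : String) (out : Int) : Prop := out = part1_alt input_instructions
instance (input_instructions : String) (out : Int) : Decidable (Spec_part1 input_instructions out) := by unfold Spec_part1; infer_instance

-- ===== CLAIM =====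
def Claim_equal_part1 : Prop := ∀ (input_instructions : String), Dom_part1 input_instructions → Spec_part1 input_instructions (part1 input_instructions)

-- ===== LEMMAS AND PROOFS =====

-- delta vector of a char (proof-side helper tying A's step to B's coordinate tables)
def pvDelta (c : Char) : Int × Int := (pvDX c, pvDY c)

-- the pair-addition step and its scan (proof-side names for A's walk)
def pvAdd2 (p d : Int × Int) : Int × Int := (p.1 + d.1, p.2 + d.2)

-- the lexicographic "strictly before" Bool used by sorted2 on pairs
def pvBef (a b : Int × Int) : Bool :=
  decide (a.1 < b.1) || (!decide (b.1 < a.1) && decide (a.2 < b.2))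

-- the (total) lexicographic order pts is sorted into
def pvLexLE (a b : Int × Int) : Prop := a.1 < b.1 ∨ (a.1 = b.1 ∧ a.2 ≤ b.2)

-- a scanl is its head consed on its tail
theorem pv_scanl_cons_tail {α β : Type} (f : β → α → β) (b : β) (l : List α) :
    List.scanl f b l = b :: (List.scanl f b l).tail := by
  cases l <;> simp [List.scanl]

-- A's loc update equals adding the delta vector
theorem pvStepA_eq_add (loc : Int × Int) (c : Char) :
    pvStepA loc c = pvAdd2 loc (pvDelta c) := by
  unfold pvStepA pvDelta pvAdd2 pvDX pvDY
  split_ifs <;> simp_all <;> omega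

-- invariant: the loop's dict component is a pure modify-fold over the tail of the
-- scan of positions (so the Dict counting lemmas apply)
theorem pv_loop_snd (l : List Char) (loc : Int × Int) (d : PySem.Dict (Int × Int) Int) :
    l.foldl
      (fun (st : (Int × Int) × PySem.Dict (Int × Int) Int) val =>
        let loc := pvStepA st.1 val
        (loc, st.2.modify loc 0 (· + 1)))
      (loc, d)
    = ((l.map pvDelta).foldl pvAdd2 loc,
       (((l.map pvDelta).scanl pvAdd2 loc).tail).foldl
         (fun d x => d.modify x 0 (· + 1)) d) := by
  induction l generalizing loc d with
  | nil => simp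
  | cons c l ih =>
      simp only [List.foldl_cons, List.map_cons, List.scanl_cons, List.tail_cons]
      rw [pv_scanl_cons_tail pvAdd2 (pvAdd2 loc (pvDelta c)) (l.map pvDelta)]
      simp only [List.foldl_cons]
      rw [pvStepA_eq_add]
      exact ih _ _

-- A's result is the number of distinct visited positions
theorem pvA_eq_set (s : String) :
    part1 s =
      (((PySem.Set.ofList ((s.toList.map pvDelta).scanl pvAdd2 ((0, 0) : Int × Int))).length : Nat) : Int) := by
  unfold part1
  simp only []
  congr 1
  rw [pv_loop_snd]
  have hsz : ∀ (d : PySem.Dict (Int × Int) Int), d.size = d.keys.length := by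
    intro d; simp [PySem.Dict.size, PySem.Dict.keys]
  rw [hsz]
  rw [PySem.Dict.keys_foldl_modify
    (((s.toList.map pvDelta).scanl pvAdd2 ((0, 0) : Int × Int)).tail)
    0 (fun _ _ => (· + 1))]
  have h0 : ((PySem.Dict.empty : PySem.Dict (Int × Int) Int).modify ((0, 0) : Int × Int) 0 (· + 1)).keys
      = [((0, 0) : Int × Int)] := by decide
  have h1 : PySem.Set.add ([] : PySem.Set (Int × Int)) ((0, 0) : Int × Int)
      = [((0, 0) : Int × Int)] := by decide
  rw [h0]
  conv_rhs => rw [pv_scanl_cons_tail pvAdd2 ((0, 0) : Int × Int) (s.toList.map pvDelta)]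
  rw [← PySem.Set.update_nil_left, PySem.Set.update_cons, h1]

-- the pair scan is the zip of the two coordinate scans
theorem pv_scanl_prod (l : List (Int × Int)) (a b : Int) :
    l.scanl pvAdd2 (a, b)
      = ((l.map Prod.fst).scanl (· + ·) a).zip ((l.map Prod.snd).scanl (· + ·) b) := by
  induction l generalizing a b with
  | nil => simp [List.scanl]
  | cons d l ih =>
      have hstep : pvAdd2 (a, b) d = (a + d.1, b + d.2) := rfl
      simp only [List.map_cons, List.scanl_cons, List.zip_cons_cons, hstep, ih]

-- distinct count of a list = card of its Finset
theorem pv_setLen_eq_card (l : List (Int × Int)) :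
    (PySem.Set.ofList l).length = l.toFinset.card := by
  rw [List.card_toFinset]
  apply List.Perm.length_eq
  apply (List.perm_ext_iff_of_nodup (PySem.Set.nodup_ofList l) l.nodup_dedup).2
  intro x
  rw [PySem.Set.mem_ofList, List.mem_dedup]

-- pvBef is irreflexive
theorem pvBef_irrefl (a : Int × Int) : pvBef a a = false := by
  simp [pvBef]

-- not-strictly-before states the lexicographic ≤
theorem pvBef_false_iff (a b : Int × Int) : pvBef b a = false ↔ pvLexLE a b := by
  simp only [pvBef, pvLexLE, Bool.or_eq_false_iff, Bool.and_eq_false_iff,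
    Bool.not_eq_false', decide_eq_true_eq, decide_eq_false_iff_not]
  omega

-- strictly-before, spelled out
theorem pvBef_true_iff (a b : Int × Int) :
    pvBef a b = true ↔ (a.1 < b.1 ∨ (a.1 ≤ b.1 ∧ a.2 < b.2)) := by
  simp only [pvBef, Bool.or_eq_true, Bool.and_eq_true, Bool.not_eq_true',
    decide_eq_true_eq, decide_eq_false_iff_not]
  omega

-- pvBef transitivity shape needed for insertion: x before y and z not before y ⇒ z not before x
theorem pvBef_trans (x y z : Int × Int) (h1 : pvBef x y = true) (h2 : pvBef z y = false) :
    pvBef z x = false := by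
  rw [pvBef_true_iff] at h1
  rw [pvBef_false_iff] at h2 ⊢
  unfold pvLexLE at *
  omega

-- inserting into a pvBef-sorted list keeps it sorted
theorem pv_insertBy_pairwise (x : Int × Int) (acc : List (Int × Int))
    (h : acc.Pairwise (fun a b => pvBef b a = false)) :
    (PySem.List.insertBy pvBef x acc).Pairwise (fun a b => pvBef b a = false) := by
  induction acc with
  | nil => simp [PySem.List.insertBy]
  | cons y ys ih =>
      rw [List.pairwise_cons] at h
      by_cases hb : pvBef x y = true
      · have : PySem.List.insertBy pvBef x (y :: ys) = x :: y :: ys := by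
          simp [PySem.List.insertBy, hb]
        rw [this, List.pairwise_cons]
        constructor
        · intro z hz
          rcases List.mem_cons.1 hz with rfl | hz
          · exact pvBef_trans x z z hb (pvBef_irrefl z)
          · exact pvBef_trans x y z hb (h.1 z hz)
        · exact List.pairwise_cons.2 h
      · have hb' : pvBef x y = false := by simp_all
        have : PySem.List.insertBy pvBef x (y :: ys) = y :: PySem.List.insertBy pvBef x ys := by
          simp [PySem.List.insertBy, hb']
        rw [this, List.pairwise_cons]
        constructor
        · intro z hz
          rcases (PySem.List.mem_insertBy pvBef x z ys).1 hz with rfl | hz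
          · exact hb'
          · exact h.1 z hz
        · exact ih h.2
  
-- sorted2 on pairs (keys fst, snd) is pairwise lexicographically ≤
theorem pv_sorted2_pairwise (l : List (Int × Int)) :
    (PySem.List.sorted2 l Prod.fst Prod.snd).Pairwise pvLexLE := by
  have key : ∀ (m : List (Int × Int)) (acc : List (Int × Int)),
      acc.Pairwise (fun a b => pvBef b a = false) →
      (m.foldl (fun acc x => PySem.List.insertBy pvBef x acc) acc).Pairwise
        (fun a b => pvBef b a = false) := by
    intro m
    induction m with
    | nil => intro acc h; simpa using h
    | cons x xs ih =>
        intro acc h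
        simp only [List.foldl_cons]
        exact ih _ (pv_insertBy_pairwise x acc h)
  have h := key l [] (by simp)
  have heq : PySem.List.sorted2 l Prod.fst Prod.snd
      = l.foldl (fun acc x => PySem.List.insertBy pvBef x acc) [] := by
    unfold PySem.List.sorted2 pvBef
    rfl
  rw [heq]
  exact h.imp (fun hab => (pvBef_false_iff _ _).1 hab)

-- pvLexLE plus inequality is strict, hence propagates to non-membership
theorem pv_lex_ne_trans (a b z : Int × Int) (hab : pvLexLE a b) (hne : a ≠ b) (hbz : pvLexLE b z) :
    a ≠ z := by
  unfold pvLexLE at *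
  intro rfl
  rcases a with ⟨a1, a2⟩; rcases b with ⟨b1, b2⟩
  simp_all [Prod.ext_iff]
  omega

-- on a lexicographically sorted nonempty list, 1 + adjacent-distinct count = card
theorem pv_count_sorted (l : List (Int × Int)) (hne : l ≠ [])
    (hs : l.Pairwise pvLexLE) :
    1 + (l.zip l.tail).countP (fun pq => pq.1 != pq.2) = l.toFinset.card := by
  induction l with
  | nil => exact absurd rfl hne
  | cons a t ih =>
      cases t with
      | nil => simp
      | cons b t' =>
          rw [List.pairwise_cons] at hs
          have htail := ih (by simp) hs.2
          simp only [List.tail_cons, List.zip_cons_cons, List.countP_cons] at htail ⊢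
          by_cases hab : a = b
          · subst hab
            simp only [bne_self_eq_false, Bool.false_eq_true, if_false, Nat.add_zero]
            rw [htail]
            simp [List.toFinset_cons]
          · have hmem : a ∉ b :: t' := by
              intro hm
              have hb : pvLexLE a b := hs.1 b (by simp)
              rcases List.mem_cons.1 hm with rfl | hm'
              · exact hab rfl
              · have hbz : pvLexLE b a := (List.pairwise_cons.1 hs.2).1 a hm'
                exact pv_lex_ne_trans a b a hb hab hbz rfl
            have hbne : (a != b) = true := bne_iff_ne.2 hab
            simp only [hbne, if_true]
            rw [List.toFinset_cons, Finset.card_insert_of_notMem (by simpa using hmem)]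
            omega

-- ===== VERDICT =====
theorem part1_spec : Claim_equal_part1 := by
  intro s _
  unfold Spec_part1 part1_alt
  simp only []
  rw [pvA_eq_set, pv_scanl_prod]
  simp only [List.map_map]
  have hfst : Prod.fst ∘ pvDelta = pvDX := rfl
  have hsnd : Prod.snd ∘ pvDelta = pvDY := rfl
  rw [hfst, hsnd]
  set P := ((s.toList.map pvDX).scanl (· + ·) (0 : Int)).zip
      ((s.toList.map pvDY).scanl (· + ·) (0 : Int)) with hP
  have hPne : P ≠ [] := by
    rw [hP, pv_scanl_cons_tail (· + ·) (0 : Int) (s.toList.map pvDX),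
      pv_scanl_cons_tail (· + ·) (0 : Int) (s.toList.map pvDY)]
    simp
  set pts := PySem.List.sorted2 P Prod.fst Prod.snd with hpts
  have hperm : pts.Perm P := PySem.List.sorted2_perm P Prod.fst Prod.snd false
  have hne : pts ≠ [] := by
    intro h
    apply hPne
    have hlen := hperm.length_eq
    rw [h] at hlen
    exact List.length_eq_zero_iff.1 hlen.symm
  have hcard : pts.toFinset = P.toFinset := List.toFinset_eq_of_perm pts P hperm
  rw [pv_setLen_eq_card, ← hcard, ← pv_count_sorted pts hne (pv_sorted2_pairwise P)]
  push_cast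
  ring
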